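-- pv_equiv track=rewrite | github.com/trungnguyencs/Interview_Prep | Nutanix/ReadEmails.py | read_emails
-- ===== SOURCE A (Python) =====
-- def read_emails(nums):
--   i = 0
--   ans = 0
--   while i < len(nums):
--     count = 0
--     if nums[i] == 1:
--       while i < len(nums) and nums[i] == 1:
--         count += 1
--         i += 1
--       ans += count + 1
--     i += 1
--   return ans - 1 if ans > 1 else ans
-- ===== SOURCE B (Python) =====
-- def read_emails(nums):
--     ones = 0
--     runs = 0
--     prev = None
--     for x in nums:
--         if x == 1:
--             ones += 1
--             if prev != 1:
--                 runs += 1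
--         prev = x
--     total = ones + runs
--     return total - 1 if total > 1 else total
-- ===== Notes on version B (the rewrite author's own statement) =====
-- stated objective: simpler
-- what changed: Replaced the index-juggling nested while loops (inner loop consuming each run of 1s, plus an extra index skip) by one flat element-wise pass maintaining two counters (ones, and run-starts via a prev tracker), combined by the identity sum(run_len+1) = ones + runs.
import Mathlib
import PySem

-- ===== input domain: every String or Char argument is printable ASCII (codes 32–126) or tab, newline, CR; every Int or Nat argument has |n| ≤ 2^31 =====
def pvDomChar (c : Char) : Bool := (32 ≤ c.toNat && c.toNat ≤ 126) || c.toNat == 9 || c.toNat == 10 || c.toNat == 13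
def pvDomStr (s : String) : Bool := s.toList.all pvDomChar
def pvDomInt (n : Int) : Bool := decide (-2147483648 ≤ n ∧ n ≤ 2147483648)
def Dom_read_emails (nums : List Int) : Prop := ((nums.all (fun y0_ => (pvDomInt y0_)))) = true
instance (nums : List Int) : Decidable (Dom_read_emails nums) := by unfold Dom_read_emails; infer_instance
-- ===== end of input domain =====

-- B replaces A's nested index-juggling while loops by one flat pass keeping two counters
-- (ones, run-starts) combined with sum(run_len+1) = ones + runs; objective: simpler.


-- ===== PORT A =====
-- inner while: `while i < len(nums) and nums[i] == 1: count += 1; i += 1`;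
-- the index is guarded by i < len, so `nums.getD i 0` is exact for Python's nums[i] here.
def readEmailsInner (nums : List Int) (i : Nat) (count : Int) : Int × Nat :=
  if h : i < nums.length ∧ nums.getD i 0 = 1 then
    readEmailsInner nums (i + 1) (count + 1)
  else
    (count, i)
termination_by nums.length - i
decreasing_by omega

-- the inner while never decreases i (needed for the outer loop's termination)
theorem readEmailsInner_ge (nums : List Int) (i : Nat) (c : Int) :
    i ≤ (readEmailsInner nums i c).2 := by
  fun_induction readEmailsInner nums i c with
  | case1 i c h ih => omega
  | case2 i c h => simp

-- outer while: count = 0; if nums[i] == 1 run the inner while, ans += count + 1; i += 1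
def readEmailsOuter (nums : List Int) (i : Nat) (ans : Int) : Int :=
  if h : i < nums.length then
    if nums.getD i 0 = 1 then
      let p := readEmailsInner nums i 0
      readEmailsOuter nums (p.2 + 1) (ans + p.1 + 1)
    else
      readEmailsOuter nums (i + 1) ans
  else
    ans
termination_by nums.length - i
decreasing_by
  · have := readEmailsInner_ge nums i 0; omega
  · omega

def read_emails (nums : List Int) : Int :=
  let ans := readEmailsOuter nums 0 0
  if ans > 1 then ans - 1 else ans

-- ===== PORT B =====
-- one flat pass: (ones, runs, prev); prev mirrors Python's `prev` (None → none)
def altStep (st : Int × Int × Option Int) (x : Int) : Int × Int × Option Int :=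
  if x = 1 then
    (st.1 + 1, (if st.2.2 ≠ some 1 then st.2.1 + 1 else st.2.1), some x)
  else
    (st.1, st.2.1, some x)

def read_emails_alt (nums : List Int) : Int :=
  let s := nums.foldl altStep (0, 0, none)
  let total := s.1 + s.2.1
  if total > 1 then total - 1 else total

-- ===== PRECONDITION & SPEC =====
def Spec_read_emails (nums : List Int) (out : Int) : Prop := out = read_emails_alt nums
instance (nums : List Int) (out : Int) : Decidable (Spec_read_emails nums out) := by unfold Spec_read_emails; infer_instance

-- ===== CLAIM (what is proved, stated in full; the proofs are below) =====
def Claim_equal_read_emails : Prop := ∀ (nums : List Int), Dom_read_emails nums → Spec_read_emails nums (read_emails nums)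

-- ===== LEMMAS AND PROOFS =====

-- length of the leading run of 1s
def runLen : List Int → Nat
  | [] => 0
  | x :: xs => if x = 1 then 1 + runLen xs else 0

-- A's per-run credit (run length + 1 per run), parameterised by whether we are inside a run
def ghSum (afterOne : Bool) : List Int → Int
  | [] => 0
  | x :: xs =>
    if x = 1 then (if afterOne then 1 else 2) + ghSum true xs
    else ghSum false xs

theorem fold_total (l : List Int) : ∀ (o r : Int) (p : Option Int),
    (l.foldl altStep (o, r, p)).1 + (l.foldl altStep (o, r, p)).2.1
      = o + r + ghSum (decide (p = some 1)) l := by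
  induction l with
  | nil => intro o r p; simp [ghSum]
  | cons x xs ih =>
    intro o r p
    rw [List.foldl_cons]
    by_cases hx : x = 1
    · by_cases hp : p = some 1
      · have hs : altStep (o, r, p) x = (o + 1, r, some x) := by
          simp [altStep, hx, hp]
        rw [hs, ih, hx]
        simp [ghSum, hp]; ring
      · have hs : altStep (o, r, p) x = (o + 1, r + 1, some x) := by
          simp [altStep, hx, hp]
        rw [hs, ih, hx]
        simp [ghSum, hp]; ring
    · have hs : altStep (o, r, p) x = (o, r, some x) := by
        simp [altStep, hx]
      rw [hs, ih]
      simp [ghSum, hx]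

theorem gh_true (l : List Int) :
    ghSum true l = (runLen l : Int) + ghSum false (l.drop (runLen l + 1)) := by
  induction l with
  | nil => simp [ghSum, runLen]
  | cons x xs ih =>
    by_cases hx : x = 1
    · simp [ghSum, runLen, hx, ih]; ring_nf
    · simp [ghSum, runLen, hx]

theorem inner_eq (nums : List Int) (i : Nat) (c : Int) :
    readEmailsInner nums i c =
      (c + (runLen (nums.drop i) : Int), i + runLen (nums.drop i)) := by
  fun_induction readEmailsInner nums i c with
  | case1 i c h ih =>
    rw [ih]
    obtain ⟨hlt, hv⟩ := h
    have hd : nums.drop i = nums[i] :: nums.drop (i + 1) :=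
      List.drop_eq_getElem_cons hlt
    have hv' : nums[i] = 1 := by rwa [List.getD_eq_getElem nums 0 hlt] at hv
    rw [hd, hv']
    simp [runLen, Prod.ext_iff]
    omega
  | case2 i c h =>
    rcases Nat.lt_or_ge i nums.length with hlt | hge
    · have hv : nums.getD i 0 ≠ 1 := fun hv => h ⟨hlt, hv⟩
      have hd : nums.drop i = nums[i] :: nums.drop (i + 1) :=
        List.drop_eq_getElem_cons hlt
      have hv' : nums[i] ≠ 1 := by rwa [List.getD_eq_getElem nums 0 hlt] at hv
      rw [hd]; simp [runLen, hv']
    · rw [List.drop_eq_nil_of_le hge]; simp [runLen]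

theorem outer_eq (nums : List Int) (i : Nat) (ans : Int) :
    readEmailsOuter nums i ans = ans + ghSum false (nums.drop i) := by
  fun_induction readEmailsOuter nums i ans with
  | case1 i ans hlt hv p ih =>
    have hp : p = (0 + (runLen (nums.drop i) : Int), i + runLen (nums.drop i)) :=
      inner_eq nums i 0
    rw [ih, hp]
    simp only
    have hd : nums.drop i = nums[i] :: nums.drop (i + 1) :=
      List.drop_eq_getElem_cons hlt
    have hv' : nums[i] = 1 := by rwa [List.getD_eq_getElem nums 0 hlt] at hv
    set r := runLen (nums.drop (i + 1)) with hr
    have hrun : runLen (nums.drop i) = 1 + r := by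
      rw [hd, hv']; simp [runLen, hr]
    have hdd : (nums.drop (i + 1)).drop (r + 1) = nums.drop (i + (1 + r) + 1) := by
      rw [List.drop_drop]; congr 1; omega
    have hgh : ghSum false (nums.drop i) = 2 + ghSum true (nums.drop (i + 1)) := by
      rw [hd, hv']; simp [ghSum]
    rw [hgh, gh_true, ← hr, hdd, hrun]
    push_cast; ring
  | case2 i ans hlt hv ih =>
    rw [ih]
    have hd : nums.drop i = nums[i] :: nums.drop (i + 1) :=
      List.drop_eq_getElem_cons hlt
    have hv' : nums[i] ≠ 1 := by rwa [List.getD_eq_getElem nums 0 hlt] at hv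
    rw [hd]; simp [ghSum, hv']
  | case3 i ans h =>
    rw [List.drop_eq_nil_of_le (by omega)]
    simp [ghSum]

-- ===== VERDICT (by name: the statement is the Claim_ definition above) =====
theorem read_emails_spec : Claim_equal_read_emails := by
  intro nums _
  unfold Spec_read_emails read_emails read_emails_alt
  have h1 := outer_eq nums 0 0
  have h2 := fold_total nums 0 0 none
  simp only [List.drop_zero] at h1
  simp only [show (decide ((none : Option Int) = some 1)) = false from rfl] at h2
  simp only [h1, h2]
  norm_num
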